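-- pv_equiv track=rewrite | github.com/MrBrantCode/unitest_baseline | mut_generate/mist_train_cf/cf_20149/solution.py | find_largest_even
-- ===== SOURCE A (Python) =====
-- def find_largest_even(lst):
--     """
--     This function finds the largest even number in a given list of integers.
--
--     Args:
--         lst (list): A list of integers.
--
--     Returns:
--         The largest even number if found, otherwise a message indicating no even numbers were found.
--     """
--     largest_even = None
--     for num in lst:
--         if num % 2 == 0:
--             if largest_even is None or num > largest_even:
--                 largest_even = num
--     if largest_even is not None:
--         return largest_even
--     else:
--         return "There are no even numbers in the list."
-- ===== SOURCE B (Python) =====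
-- def find_largest_even(lst):
--     for num in sorted(lst, reverse=True):
--         if num % 2 == 0:
--             return num
--     return "There are no even numbers in the list."
-- ===== Notes on version B (the rewrite author's own statement) =====
-- stated objective: alternative
-- what changed: Replaces A's single-pass running-max accumulator by sort-then-scan: sort the list in descending order and return the first even element encountered (correct because in a descending list the first even element is the largest even).
import Mathlib
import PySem

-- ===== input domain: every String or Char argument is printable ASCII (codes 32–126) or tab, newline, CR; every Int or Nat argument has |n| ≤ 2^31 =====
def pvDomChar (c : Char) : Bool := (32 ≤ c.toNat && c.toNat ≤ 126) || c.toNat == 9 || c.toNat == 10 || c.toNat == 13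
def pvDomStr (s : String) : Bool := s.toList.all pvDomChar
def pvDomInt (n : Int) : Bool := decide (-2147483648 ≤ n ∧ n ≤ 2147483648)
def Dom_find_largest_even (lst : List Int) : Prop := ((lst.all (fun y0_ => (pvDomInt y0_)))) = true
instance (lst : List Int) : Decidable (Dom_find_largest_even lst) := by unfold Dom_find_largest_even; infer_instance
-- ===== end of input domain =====

-- B replaces A's running-max loop by sort-descending-then-first-even (alternative algorithm); same values on Pre_.


-- ===== PORT A =====
def find_largest_even (lst : List Int) : Option Int :=
  let largest_even : Option Int :=
    lst.foldl (fun acc num =>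
      if PySem.Int.mod num 2 == 0 then
        match acc with
        | none => some num
        | some l => if num > l then some num else acc
      else acc) none
  match largest_even with
  | some v => some v
  | none => none   -- Python A returns a message STRING here; outside Pre_ (not a value of type Option Int)

-- ===== PORT B =====
def find_largest_even_alt (lst : List Int) : Option Int :=
  match (PySem.List.sorted lst (fun x => x) true).find? (fun num => PySem.Int.mod num 2 == 0) with
  | some num => some num
  | none => none   -- Python B returns the same message STRING here; outside Pre_

-- ===== PRECONDITION & SPEC =====
-- Pre_ excludes lists with no even element: there Python A (and B) return a message STRING, not an int.
def Pre_find_largest_even (lst : List Int) : Prop := ∃ n ∈ lst, PySem.Int.mod n 2 = 0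
instance (lst : List Int) : Decidable (Pre_find_largest_even lst) := by unfold Pre_find_largest_even; infer_instance
def pvWitness_find_largest_even : List Int := [3, 4, 7]

def Spec_find_largest_even (lst : List Int) (out : Option Int) : Prop := out = find_largest_even_alt lst
instance (lst : List Int) (out : Option Int) : Decidable (Spec_find_largest_even lst out) := by unfold Spec_find_largest_even; infer_instance

-- ===== CLAIM (what is proved, stated in full; the proofs are below) =====
def Claim_equal_find_largest_even : Prop := ∀ (lst : List Int), Dom_find_largest_even lst → Pre_find_largest_even lst → Spec_find_largest_even lst (find_largest_even lst)

-- ===== LEMMAS AND PROOFS =====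
def pvStepA (acc : Option Int) (num : Int) : Option Int :=
  if PySem.Int.mod num 2 == 0 then
    match acc with
    | none => some num
    | some l => if num > l then some num else acc
  else acc

theorem pvStepA_some (a num : Int) :
    pvStepA (some a) num =
      some (if PySem.Int.mod num 2 == 0 then max a num else a) := by
  simp only [pvStepA]
  split_ifs with h <;> simp_all <;> omega

theorem pvFoldA_some (l : List Int) (a : Int) :
    l.foldl pvStepA (some a) =
      some ((l.filter (fun n => PySem.Int.mod n 2 == 0)).foldl max a) := by
  induction l generalizing a with
  | nil => rfl
  | cons x t ih =>
    simp only [List.foldl_cons, pvStepA_some, List.filter_cons]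
    by_cases h : (PySem.Int.mod x 2 == 0) = true
    · simp only [h, if_true, ih, List.foldl_cons]
    · simp only [Bool.not_eq_true] at h
      simp only [h, Bool.false_eq_true, if_false, ih]

theorem pvFoldA_none (l : List Int) :
    l.foldl pvStepA none =
      match l.filter (fun n => PySem.Int.mod n 2 == 0) with
      | [] => none
      | x :: t => some (t.foldl max x) := by
  induction l with
  | nil => rfl
  | cons x t ih =>
    simp only [List.foldl_cons, List.filter_cons]
    by_cases h : (PySem.Int.mod x 2 == 0) = true
    · simp only [h, if_true, pvStepA]
      exact pvFoldA_some t x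
    · simp only [Bool.not_eq_true] at h
      simp only [h, Bool.false_eq_true, if_false, pvStepA, ih]

-- In a list that is pairwise descending, the first element satisfying p bounds all elements satisfying p.
theorem pvFind_desc_isMax (l : List Int) (p : Int → Bool) :
    ∀ (m : Int), l.Pairwise (fun a b => b ≤ a) → l.find? p = some m →
    ∀ y ∈ l, p y = true → y ≤ m := by
  induction l with
  | nil => intro m _ hf; simp at hf
  | cons x t ih =>
    intro m hp hf
    rcases List.pairwise_cons.mp hp with ⟨hx, ht⟩
    by_cases hpx : p x = true
    · rw [List.find?_cons_of_pos hpx] at hf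
      injection hf with hf; subst hf
      intro y hy _
      rcases List.mem_cons.mp hy with rfl | hy
      · exact le_refl _
      · exact hx y hy
    · rw [List.find?_cons_of_neg (by simpa using hpx)] at hf
      intro y hy hpy
      rcases List.mem_cons.mp hy with rfl | hy
      · exact absurd hpy hpx
      · exact ih m ht hf y hy hpy

-- ===== VERDICT (by name: the statement is the Claim_ definition above) =====
theorem find_largest_even_spec : Claim_equal_find_largest_even := by
  intro lst _ hpre
  obtain ⟨n, hn, hne⟩ := hpre
  unfold Spec_find_largest_even find_largest_even find_largest_even_alt
  show (match lst.foldl pvStepA none with | some v => some v | none => none) = _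
  rw [pvFoldA_none]
  -- A's side: the max of the evens
  cases hflt : lst.filter (fun n => PySem.Int.mod n 2 == 0) with
  | nil =>
    exfalso
    have : n ∈ lst.filter (fun n => PySem.Int.mod n 2 == 0) :=
      List.mem_filter.mpr ⟨hn, by simp [PySem.Int.mod, Int.fmod_eq_emod_of_nonneg] at hne ⊢; omega⟩
    rw [hflt] at this; simp at this
  | cons x t =>
    -- B's side: find? on the sorted list is some m
    have hsp : (PySem.List.sorted lst (fun x => x) true).Pairwise (fun a b => b ≤ a) :=
      PySem.List.sorted_pairwise_rev lst (fun x => x)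
    have hmem : ∀ y, y ∈ PySem.List.sorted lst (fun x => x) true ↔ y ∈ lst :=
      fun y => PySem.List.mem_sorted lst (fun x => x) true y
    cases hfind : (PySem.List.sorted lst (fun x => x) true).find? (fun num => PySem.Int.mod num 2 == 0) with
    | none =>
      exfalso
      have := List.find?_eq_none.mp hfind n ((hmem n).mpr hn)
      simp [PySem.Int.mod, Int.fmod_eq_emod_of_nonneg] at this hne
      omega
    | some m =>
      -- m is even, m ∈ lst
      have hpm : (PySem.Int.mod m 2 == 0) = true := by
        have := List.find?_some hfind
        simpa using this
      have hmmem : m ∈ lst := (hmem m).mp (List.mem_of_find?_eq_some hfind)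
      -- a := t.foldl max x is the max of the evens
      have ha_max : PySem.List.max? (x :: t) (fun y => y) = some (t.foldl max x) :=
        PySem.List.max?_id_cons x t
      have ha_mem : t.foldl max x ∈ lst.filter (fun n => PySem.Int.mod n 2 == 0) := by
        rw [hflt]; exact PySem.List.max?_mem ha_max
      have ha_isMax : ∀ y ∈ (x :: t), y ≤ t.foldl max x :=
        fun y hy => PySem.List.max?_isMax ha_max y hy
      -- m ≤ a : m is in the filter
      have hm_filter : m ∈ lst.filter (fun n => PySem.Int.mod n 2 == 0) :=
        List.mem_filter.mpr ⟨hmmem, hpm⟩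
      have h1 : m ≤ t.foldl max x := ha_isMax m (hflt ▸ hm_filter)
      -- a ≤ m : a is even, in sorted list, find? bounds it
      have ha_even : (PySem.Int.mod (t.foldl max x) 2 == 0) = true :=
        (List.mem_filter.mp ha_mem).2
      have ha_in_sorted : t.foldl max x ∈ PySem.List.sorted lst (fun x => x) true :=
        (hmem _).mpr (List.mem_filter.mp ha_mem).1
      have h2 : t.foldl max x ≤ m :=
        pvFind_desc_isMax _ _ m hsp hfind _ ha_in_sorted ha_even
      show some (t.foldl max x) = some m
      exact congrArg some (le_antisymm h2 h1)
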